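-- pv_equiv track=rewrite | github.com/mightyYaroslav/battleship | dimensions.py | for_game
-- ===== SOURCE A (Python) =====
-- from typing import Dict
--
-- def for_game(max_height: int, max_width: int) -> Dict[str, Dict[str, int]]:
--     dims = {
--         "title": {
--             "width": max_width,
--             "height": 1
--         },
--         "subtitle": {
--             "width": round(max_width / 2),
--             "height": 1
--         },
--         "player": {
--             "width": round(max_width / 2),
--             "height": round(max_height / 2)
--         },
--         "history": {
--             "width": max_width
--         },
--         "command": {
--             "width": max_width,
--             "height": 4
--         }
--     }
--
--     sumheight = 0
--     for v in dims.values():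
--         for (dim_key, dim_val) in v.items():
--             if dim_key == "height":
--                 sumheight += dim_val
--
--     dims["history"]["height"] = max_height - sumheight
--     return dims
-- ===== SOURCE B (Python) =====
-- def for_game(max_height: int, max_width: int):
--     half_w = round(max_width / 2)
--     half_h = round(max_height / 2)
--     heights = {"title": 1, "subtitle": 1, "player": half_h,
--                "history": max_height - 6 - half_h, "command": 4}
--     widths = {"title": max_width, "subtitle": half_w, "player": half_w,
--               "history": max_width, "command": max_width}
--     return {k: {"width": widths[k], "height": heights[k]} for k in heights}
-- ===== Notes on version B (the rewrite author's own statement) =====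
-- stated objective: alternative
-- what changed: Replaced the literal-then-mutate construction (build nested dict, loop to sum heights, patch history in place) by a table-driven build: two flat dicts of per-section heights (history in closed form max_height - 6 - round(max_height/2)) and widths, assembled into the nested dict by a comprehension over the keys.
import Mathlib
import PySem

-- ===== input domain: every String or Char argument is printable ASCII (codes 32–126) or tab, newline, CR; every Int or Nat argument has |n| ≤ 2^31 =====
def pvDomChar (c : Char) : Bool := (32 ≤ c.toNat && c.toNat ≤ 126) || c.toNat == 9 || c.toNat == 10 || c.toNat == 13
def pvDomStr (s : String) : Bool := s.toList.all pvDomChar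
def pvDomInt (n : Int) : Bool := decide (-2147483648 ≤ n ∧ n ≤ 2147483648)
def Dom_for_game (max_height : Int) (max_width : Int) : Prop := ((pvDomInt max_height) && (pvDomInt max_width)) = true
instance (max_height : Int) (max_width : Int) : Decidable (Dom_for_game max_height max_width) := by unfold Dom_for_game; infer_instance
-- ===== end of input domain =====

-- B drops A's build-then-mutate shape (summation loop + in-place patch of history): it builds two
-- flat dicts of per-section heights (history's in closed form max_height - 6 - round(max_height/2))
-- and widths and assembles the nested dict by a comprehension over the keys (objective: alternative).

-- Python round(n / 2) for an int n with |n| ≤ 2^31 (n/2 is an exact float there):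
-- half-to-even ("banker's") rounding. Exact by parity cases; both Pythons call round(·/2).
def pyRoundHalf (n : Int) : Int :=
  if PySem.Int.mod n 2 = 0 then PySem.Int.floordiv n 2
  else
    let k := PySem.Int.floordiv n 2
    if PySem.Int.mod k 2 = 0 then k else k + 1

-- ===== PORT A =====
def for_game (max_height : Int) (max_width : Int) : List (String × List (String × Int)) :=
  let dims : List (String × List (String × Int)) :=
    [("title", [("width", max_width), ("height", 1)]),
     ("subtitle", [("width", pyRoundHalf max_width), ("height", 1)]),
     ("player", [("width", pyRoundHalf max_width), ("height", pyRoundHalf max_height)]),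
     ("history", [("width", max_width)]),
     ("command", [("width", max_width), ("height", 4)])]
  let sumheight : Int :=
    dims.foldl (fun acc p =>
      p.2.foldl (fun acc2 q => if q.1 == "height" then acc2 + q.2 else acc2) acc) 0
  -- dims["history"]["height"] = …  : "height" is a NEW key of that inner dict, so it appends
  dims.map (fun p =>
    if p.1 == "history" then (p.1, p.2 ++ [("height", max_height - sumheight)]) else p)

-- ===== PORT B =====
def for_game_alt (max_height : Int) (max_width : Int) : List (String × List (String × Int)) :=
  let half_w := pyRoundHalf max_width
  let half_h := pyRoundHalf max_height
  let heights : PySem.Dict String Int :=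
    PySem.Dict.ofList [("title", 1), ("subtitle", 1), ("player", half_h),
                       ("history", max_height - 6 - half_h), ("command", 4)]
  let widths : PySem.Dict String Int :=
    PySem.Dict.ofList [("title", max_width), ("subtitle", half_w), ("player", half_w),
                       ("history", max_width), ("command", max_width)]
  -- {k: {"width": widths[k], "height": heights[k]} for k in heights}; every key is present,
  -- so the getD default is never used (exact here)
  heights.keys.map (fun k =>
    (k, [("width", widths.getD k 0), ("height", heights.getD k 0)]))

-- ===== PRECONDITION & SPEC =====
def Spec_for_game (max_height : Int) (max_width : Int) (out : List (String × List (String × Int))) : Prop := out = for_game_alt max_height max_width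
instance (max_height : Int) (max_width : Int) (out : List (String × List (String × Int))) : Decidable (Spec_for_game max_height max_width out) := by unfold Spec_for_game; infer_instance

-- ===== CLAIM =====
def Claim_equal_for_game : Prop := ∀ (max_height : Int) (max_width : Int), Dom_for_game max_height max_width → Spec_for_game max_height max_width (for_game max_height max_width)

-- ===== LEMMAS AND PROOFS =====

-- ===== VERDICT =====
theorem for_game_spec : Claim_equal_for_game := by
  intro mh mw _
  unfold Spec_for_game for_game for_game_alt
  generalize pyRoundHalf mh = hh
  simp [PySem.Dict.ofList, PySem.Dict.update, PySem.Dict.insert, PySem.Dict.empty,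
    PySem.Dict.contains, PySem.Dict.get?, PySem.Dict.getD, PySem.Dict.keys, List.foldl]
  omega
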